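-- pv_equiv track=rewrite | github.com/pypi-data/pypi-mirror-402 | packages/brynq-sdk-sage-100-france/brynq_sdk_sage_100_france-1.2.1.tar.gz/brynq_sdk_sage_100_france-1.2.1/brynq_sdk_sage_100_france/employee.py | _generate_child_field_specs
-- ===== SOURCE A (Python) =====
-- def _generate_child_field_specs(max_children: int) -> dict:
--     """
--     Generate field specifications for child data dynamically.
--
--     Args:
--         max_children: Maximum number of children to support
--
--     Returns:
--         Dictionary with child field specifications
--     """
--     child_specs = {}
--
--     # Starting position for first child (after number_of_children field)
--     base_position = 364
--
--     for child_num in range(1, max_children + 1):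
--         # Each child takes 62 positions (2+20+30+8+1+1)
--         child_base_pos = base_position + ((child_num - 1) * 62)
--
--         child_specs.update({
--             f'child_{child_num}_number': {'position': child_base_pos, 'length': 2},
--             f'child_{child_num}_first_name': {'position': child_base_pos + 2, 'length': 20},
--             f'child_{child_num}_last_name': {'position': child_base_pos + 22, 'length': 30},
--             f'child_{child_num}_birth_date': {'position': child_base_pos + 52, 'length': 8},
--             f'child_{child_num}_gender': {'position': child_base_pos + 60, 'length': 1},
--             f'child_{child_num}_dependent': {'position': child_base_pos + 61, 'length': 1},
--         })
--
--     return child_specs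
-- ===== SOURCE B (Python) =====
-- _CHILD_FIELDS = (
--     ("number", 2),
--     ("first_name", 20),
--     ("last_name", 30),
--     ("birth_date", 8),
--     ("gender", 1),
--     ("dependent", 1),
-- )
--
--
-- def _generate_child_field_specs(max_children: int) -> dict:
--     """Running-cursor variant: positions are never computed from a base/offset
--     formula; a single position counter starts at 364 and advances by each
--     field's length across the whole flat record (children are contiguous)."""
--     specs = {}
--     pos = 364
--     for child in range(1, max_children + 1):
--         for name, length in _CHILD_FIELDS:
--             specs[f'child_{child}_{name}'] = {'position': pos, 'length': length}
--             pos += length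
--     return specs
-- ===== Notes on version B (the rewrite author's own statement) =====
-- stated objective: alternative
-- what changed: B carries a single running position cursor (starting at 364, advanced by each field's length, flowing contiguously across children) and a lengths-only table, instead of A's per-child base arithmetic with six hard-coded offset/length literals.
import Mathlib
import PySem

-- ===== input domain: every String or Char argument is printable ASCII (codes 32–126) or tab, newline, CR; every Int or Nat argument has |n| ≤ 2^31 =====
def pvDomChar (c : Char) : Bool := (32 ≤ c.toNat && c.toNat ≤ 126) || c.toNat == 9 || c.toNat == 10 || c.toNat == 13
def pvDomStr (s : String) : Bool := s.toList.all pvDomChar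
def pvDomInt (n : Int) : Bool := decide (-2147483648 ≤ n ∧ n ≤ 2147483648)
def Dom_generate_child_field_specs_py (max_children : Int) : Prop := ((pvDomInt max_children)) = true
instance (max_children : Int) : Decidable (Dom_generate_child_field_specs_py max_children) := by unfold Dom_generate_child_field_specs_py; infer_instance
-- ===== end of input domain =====

-- B replaces A's per-child base/offset arithmetic (six hard-coded literal entries) with a
-- single running position cursor advanced by each field's length across the flat record.

-- ===== PORT A =====
def generate_child_field_specs_py (max_children : Int) : List (String × List (String × Int)) :=
  ((PySem.List.pyRange 1 (max_children + 1) 1).foldl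
    (fun (child_specs : PySem.Dict String (List (String × Int))) child_num =>
      let child_base_pos : Int := 364 + (child_num - 1) * 62
      ((((((child_specs.insert
        ("child_" ++ PySem.Int.toStr child_num ++ "_number")
          [("position", child_base_pos), ("length", 2)]).insert
        ("child_" ++ PySem.Int.toStr child_num ++ "_first_name")
          [("position", child_base_pos + 2), ("length", 20)]).insert
        ("child_" ++ PySem.Int.toStr child_num ++ "_last_name")
          [("position", child_base_pos + 22), ("length", 30)]).insert
        ("child_" ++ PySem.Int.toStr child_num ++ "_birth_date")
          [("position", child_base_pos + 52), ("length", 8)]).insert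
        ("child_" ++ PySem.Int.toStr child_num ++ "_gender")
          [("position", child_base_pos + 60), ("length", 1)]).insert
        ("child_" ++ PySem.Int.toStr child_num ++ "_dependent")
          [("position", child_base_pos + 61), ("length", 1)]))
    PySem.Dict.empty).items

-- ===== PORT B =====
-- lengths-only field table (_CHILD_FIELDS in Source B)
def childFields : List (String × Int) :=
  [("number", 2), ("first_name", 20), ("last_name", 30),
   ("birth_date", 8), ("gender", 1), ("dependent", 1)]

def generate_child_field_specs_py_alt (max_children : Int) : List (String × List (String × Int)) :=
  ((PySem.List.pyRange 1 (max_children + 1) 1).foldl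
    (fun (st : PySem.Dict String (List (String × Int)) × Int) child =>
      childFields.foldl
        (fun st f =>
          (st.1.insert ("child_" ++ PySem.Int.toStr child ++ "_" ++ f.1)
             [("position", st.2), ("length", f.2)], st.2 + f.2)) st)
    (PySem.Dict.empty, 364)).1.items

-- ===== PRECONDITION & SPEC =====
def Spec_generate_child_field_specs_py (max_children : Int) (out : List (String × List (String × Int))) : Prop := out = generate_child_field_specs_py_alt max_children
instance (max_children : Int) (out : List (String × List (String × Int))) : Decidable (Spec_generate_child_field_specs_py max_children out) := by unfold Spec_generate_child_field_specs_py; infer_instance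

-- ===== CLAIM (what is proved, stated in full; the proofs are below) =====
def Claim_equal_generate_child_field_specs_py : Prop := ∀ (max_children : Int), Dom_generate_child_field_specs_py max_children → Spec_generate_child_field_specs_py max_children (generate_child_field_specs_py max_children)

-- ===== LEMMAS AND PROOFS =====

-- Invariant: B's running cursor equals A's per-child base formula at each child's start.
theorem pv_fold_inv (k : ℕ) : ∀ (c : Int) (d : PySem.Dict String (List (String × Int))),
    (PySem.List.pyRange c (c + k) 1).foldl
      (fun (st : PySem.Dict String (List (String × Int)) × Int) child =>
        childFields.foldl
          (fun st f =>
            (st.1.insert ("child_" ++ PySem.Int.toStr child ++ "_" ++ f.1)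
               [("position", st.2), ("length", f.2)], st.2 + f.2)) st)
      (d, 364 + (c - 1) * 62)
    = ((PySem.List.pyRange c (c + k) 1).foldl
        (fun (child_specs : PySem.Dict String (List (String × Int))) child_num =>
          let child_base_pos : Int := 364 + (child_num - 1) * 62
          ((((((child_specs.insert
            ("child_" ++ PySem.Int.toStr child_num ++ "_number")
              [("position", child_base_pos), ("length", 2)]).insert
            ("child_" ++ PySem.Int.toStr child_num ++ "_first_name")
              [("position", child_base_pos + 2), ("length", 20)]).insert
            ("child_" ++ PySem.Int.toStr child_num ++ "_last_name")
              [("position", child_base_pos + 22), ("length", 30)]).insert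
            ("child_" ++ PySem.Int.toStr child_num ++ "_birth_date")
              [("position", child_base_pos + 52), ("length", 8)]).insert
            ("child_" ++ PySem.Int.toStr child_num ++ "_gender")
              [("position", child_base_pos + 60), ("length", 1)]).insert
            ("child_" ++ PySem.Int.toStr child_num ++ "_dependent")
              [("position", child_base_pos + 61), ("length", 1)])) d,
        364 + (c + k - 1) * 62) := by
  induction k with
  | zero =>
    intro c d
    rw [show c + ((0:ℕ) : Int) = c from by push_cast; ring,
      PySem.List.pyRange_one_eq_nil le_rfl]
    simp
  | succ n ih =>
    intro c d
    rw [PySem.List.pyRange_one_cons (by push_cast; omega : c < c + ((n+1 : ℕ) : Int))]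
    simp only [List.foldl_cons, childFields, List.foldl_nil] at ih ⊢
    have h1 : (c + ((n+1 : ℕ) : Int)) = (c + 1) + (n : ℕ) := by push_cast; omega
    rw [h1]
    have h2 : 364 + (c - 1) * 62 + 2 + 20 + 30 + 8 + 1 + 1 = 364 + ((c + 1) - 1) * 62 := by ring
    rw [h2, ih (c + 1) _]
    congr 1
    congr 1
    simp only [String.append_assoc,
      show ("_" : String) ++ "number" = "_number" from rfl,
      show ("_" : String) ++ "first_name" = "_first_name" from rfl,
      show ("_" : String) ++ "last_name" = "_last_name" from rfl,
      show ("_" : String) ++ "birth_date" = "_birth_date" from rfl,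
      show ("_" : String) ++ "gender" = "_gender" from rfl,
      show ("_" : String) ++ "dependent" = "_dependent" from rfl]
    congr 1 <;> ring_nf

-- ===== VERDICT (by name: the statement is the Claim_ definition above) =====
theorem generate_child_field_specs_py_spec : Claim_equal_generate_child_field_specs_py := by
  intro m _
  unfold Spec_generate_child_field_specs_py
  unfold generate_child_field_specs_py generate_child_field_specs_py_alt
  by_cases hm : m ≤ 0
  · rw [PySem.List.pyRange_one_eq_nil (by omega)]
    rfl
  · have hk : m + 1 = 1 + (m.toNat : Int) := by omega
    rw [hk]
    have h := pv_fold_inv m.toNat 1 PySem.Dict.empty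
    simp only [show 364 + ((1:Int) - 1) * 62 = 364 from by ring] at h
    rw [h]
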